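-- pv_equiv track=rewrite | github.com/eclipse-oniro-mirrors/arkcompiler_runtime_core | taihe/compiler/taihe/parse/convert.py | is_valid_pkg_name
-- ===== SOURCE A (Python) =====
-- def is_valid_pkg_name(name: str) -> bool:
--     """Checks if the package name is valid."""
--     for part in name.split("."):
--         if not part:
--             return False
--         if not all(c.isalpha() or c == "_" for c in part[:1]):
--             return False
--         if not all(c.isalnum() or c == "_" for c in part[1:]):
--             return False
--     return True
-- ===== SOURCE B (Python) =====
-- def is_valid_pkg_name(name: str) -> bool:
--     """Checks if the package name is valid (single scan, no intermediate part list)."""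
--     at_part_start = True
--     for c in name:
--         if c == ".":
--             if at_part_start:
--                 return False
--             at_part_start = True
--         elif at_part_start:
--             if not (c.isalpha() or c == "_"):
--                 return False
--             at_part_start = False
--         else:
--             if not (c.isalnum() or c == "_"):
--                 return False
--     return not at_part_start
-- ===== Notes on version B (the rewrite author's own statement) =====
-- stated objective: alternative
-- what changed: Replaced splitting the name into parts and checking each part with slices by a single left-to-right character scan that tracks an at-part-start flag and builds no intermediate part list.
import Mathlib
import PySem

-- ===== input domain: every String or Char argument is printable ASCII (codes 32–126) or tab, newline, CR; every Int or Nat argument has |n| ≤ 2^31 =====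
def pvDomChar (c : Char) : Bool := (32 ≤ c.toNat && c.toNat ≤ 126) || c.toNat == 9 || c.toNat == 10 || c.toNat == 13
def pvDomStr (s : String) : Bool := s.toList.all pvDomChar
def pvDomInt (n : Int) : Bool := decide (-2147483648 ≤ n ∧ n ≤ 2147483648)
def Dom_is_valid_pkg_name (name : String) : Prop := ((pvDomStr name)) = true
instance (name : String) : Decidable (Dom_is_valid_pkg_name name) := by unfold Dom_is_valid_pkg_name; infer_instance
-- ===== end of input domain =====

-- B replaces A's split-into-parts + per-part slice checks with one left-to-right
-- character scan carrying an at-part-start flag; same results, no intermediate part list.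

-- ===== PORT A =====
-- the for-loop over the list of dot-separated parts, with its early returns, as structural recursion
def pvALoop : List (List Char) → Bool
  | [] => true
  | part :: rest =>
    if part.isEmpty then false
    else if ¬ ((PySem.List.slice part none (some 1)).all
        (fun c => PySem.Chars.isalpha c || c == '_')) then false
    else if ¬ ((PySem.List.slice part (some 1) none).all
        (fun c => PySem.Chars.isalnum c || c == '_')) then false
    else pvALoop rest

def is_valid_pkg_name (name : String) : Bool :=
  pvALoop (PySem.Chars.splitOn name.toList ['.'])

-- ===== PORT B =====
-- the scan of Source B: at_part_start is the Bool state
def pvBGo : List Char → Bool → Bool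
  | [], atStart => !atStart
  | c :: cs, atStart =>
    if c == '.' then
      if atStart then false else pvBGo cs true
    else if atStart then
      if ¬ (PySem.Chars.isalpha c || c == '_') then false else pvBGo cs false
    else
      if ¬ (PySem.Chars.isalnum c || c == '_') then false else pvBGo cs false

def is_valid_pkg_name_alt (name : String) : Bool :=
  pvBGo name.toList true

-- ===== PRECONDITION & SPEC =====
def Spec_is_valid_pkg_name (name : String) (out : Bool) : Prop := out = is_valid_pkg_name_alt name
instance (name : String) (out : Bool) : Decidable (Spec_is_valid_pkg_name name out) := by unfold Spec_is_valid_pkg_name; infer_instance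

-- ===== CLAIM (what is proved, stated in full; the proofs are below) =====
def Claim_equal_is_valid_pkg_name : Prop := ∀ (name : String), Dom_is_valid_pkg_name name → Spec_is_valid_pkg_name name (is_valid_pkg_name name)

-- ===== LEMMAS AND PROOFS =====

-- simple recursive characterization of splitting on '.'
def pvSp : List Char → List (List Char)
  | [] => [[]]
  | c :: cs =>
    if c = '.' then [] :: pvSp cs
    else
      match pvSp cs with
      | p :: ps => (c :: p) :: ps
      | [] => [[c]]

def pvAug (pre : List Char) : List (List Char) → List (List Char)
  | p :: ps => (pre ++ p) :: ps
  | [] => [pre]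

lemma pvSp_ne_nil (cs : List Char) : pvSp cs ≠ [] := by
  cases cs with
  | nil => simp [pvSp]
  | cons c cs =>
    simp only [pvSp]
    split
    · simp
    · cases pvSp cs <;> simp

lemma pvAug_nil (l : List (List Char)) (h : l ≠ []) : pvAug [] l = l := by
  cases l with
  | nil => exact absurd rfl h
  | cons p ps => simp [pvAug]

lemma pvGo_spec : ∀ (fuel : Nat) (l cur : List Char) (acc : List (List Char)),
    l.length ≤ fuel →
    PySem.Chars.splitOn.go ['.'] fuel l cur acc = acc.reverse ++ pvAug cur.reverse (pvSp l) := by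
  intro fuel
  induction fuel with
  | zero =>
    intro l cur acc h
    have hl : l = [] := List.eq_nil_of_length_eq_zero (Nat.le_zero.mp h)
    subst hl
    simp [PySem.Chars.splitOn.go, pvSp, pvAug]
  | succ f ih =>
    intro l cur acc h
    cases l with
    | nil => simp [PySem.Chars.splitOn.go, pvSp, pvAug]
    | cons c rest =>
      by_cases hc : c = '.'
      · subst hc
        have hpre : List.isPrefixOf ['.'] ('.' :: rest) = true := by
          simp [List.isPrefixOf]
        rw [PySem.Chars.splitOn.go]
        simp only [hpre, if_pos]
        have : List.length ['.'] = 1 := rfl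
        rw [this]
        simp only [List.drop_one, List.tail_cons]
        rw [ih rest [] (cur.reverse :: acc) (by simpa using Nat.le_of_succ_le_succ h)]
        simp only [List.reverse_nil]
        rw [pvAug_nil (pvSp rest) (pvSp_ne_nil rest)]
        simp [pvSp, pvAug]
      · have hpre : List.isPrefixOf ['.'] (c :: rest) = false := by
          simp only [List.isPrefixOf, List.isPrefixOf_nil_left, Bool.and_true,
            beq_eq_false_iff_ne, ne_eq]
          exact fun h => hc h.symm
        rw [PySem.Chars.splitOn.go]
        simp only [hpre, Bool.false_eq_true, if_neg, not_false_iff]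
        rw [ih rest (c :: cur) acc (by simpa using Nat.le_of_succ_le_succ h)]
        obtain ⟨p, ps, hps⟩ : ∃ p ps, pvSp rest = p :: ps := by
          cases hsp : pvSp rest with
          | nil => exact absurd hsp (pvSp_ne_nil rest)
          | cons p ps => exact ⟨p, ps, rfl⟩
        simp [pvSp, hc, hps, pvAug]

lemma pvSplitOn_eq (cs : List Char) : PySem.Chars.splitOn cs ['.'] = pvSp cs := by
  unfold PySem.Chars.splitOn
  rw [pvGo_spec (cs.length + 1) cs [] [] (Nat.le_succ _)]
  simpa using pvAug_nil (pvSp cs) (pvSp_ne_nil cs)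

lemma pvAllAlnum (p : List Char) :
    (!decide (∃ x ∈ p, PySem.Chars.isalnum x = false ∧ ¬x = '_')) =
      p.all (fun c => PySem.Chars.isalnum c || c == '_') := by
  rw [Bool.eq_iff_iff]
  simp only [List.all_eq_true, Bool.not_eq_true', decide_eq_false_iff_not, not_exists, not_and,
    Bool.or_eq_true, beq_iff_eq]
  constructor <;> intro h x hx <;> have hx2 := h x hx <;>
    cases hh : PySem.Chars.isalnum x <;> simp_all

lemma pvBGo_eq : ∀ (cs : List Char),
    (pvBGo cs true = pvALoop (pvSp cs)) ∧
    (pvBGo cs false =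
      (match pvSp cs with
       | p :: ps => p.all (fun c => PySem.Chars.isalnum c || c == '_') && pvALoop ps
       | [] => true)) := by
  intro cs
  induction cs with
  | nil => simp [pvBGo, pvSp, pvALoop]
  | cons c cs ih =>
    obtain ⟨ih1, ih2⟩ := ih
    by_cases hc : c = '.'
    · subst hc
      constructor
      · simp [pvBGo, pvSp, pvALoop]
      · simp [pvBGo, pvSp, ih1]
    · obtain ⟨p, ps, hps⟩ : ∃ p ps, pvSp cs = p :: ps := by
        cases hsp : pvSp cs with
        | nil => exact absurd hsp (pvSp_ne_nil cs)
        | cons p ps => exact ⟨p, ps, rfl⟩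
      have hsp : pvSp (c :: cs) = (c :: p) :: ps := by simp [pvSp, hc, hps]
      have htake : PySem.List.slice (c :: p) none (some 1) = [c] := by
        rw [PySem.List.slice_to]
        · rfl
        · norm_num
      have hdrop : PySem.List.slice (c :: p) (some 1) none = p := by
        rw [PySem.List.slice_from_one]; rfl
      constructor
      · rw [hsp]
        by_cases ha : (PySem.Chars.isalpha c || c == '_') = true
        · simp [pvBGo, hc, ha, pvALoop, htake, hdrop, ih2, hps, pvAllAlnum, Bool.and_assoc]
        · simp [pvBGo, hc, ha, pvALoop, htake]
      · rw [hsp]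
        by_cases ha : (PySem.Chars.isalnum c || c == '_') = true
        · simp [pvBGo, hc, ha, ih2, hps, pvAllAlnum, Bool.and_assoc]
        · simp [pvBGo, hc, ha]

-- ===== VERDICT (by name: the statement is the Claim_ definition above) =====
theorem is_valid_pkg_name_spec : Claim_equal_is_valid_pkg_name := by
  intro name _
  unfold Spec_is_valid_pkg_name is_valid_pkg_name is_valid_pkg_name_alt
  rw [pvSplitOn_eq, (pvBGo_eq name.toList).1]
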